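-- pv_equiv track=rewrite | github.com/Lorenzo-Trombus/Esercizi | lezione5/lezione5.py | is_magic_number
-- ===== SOURCE A (Python) =====
-- def is_magic_number(num: int) -> bool:
--     numstr=str(num)
--     numlist=list(numstr)
--     ind=0
--     for i in numlist :
--         ind+=1
--         if i =="7":
--             return True
--         elif ind not in range(len(numlist)):
--             return False
-- ===== SOURCE B (Python) =====
-- def is_magic_number(num: int) -> bool:
--     n = abs(num)
--     while n:
--         if n % 10 == 7:
--             return True
--         n //= 10
--     return False
-- ===== Notes on version B (the rewrite author's own statement) =====
-- stated objective: idiomatic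
-- what changed: B extracts digits arithmetically (abs + repeated %10, //10) instead of converting the number to a string and scanning its characters with a manual index/range membership test.
import Mathlib
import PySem

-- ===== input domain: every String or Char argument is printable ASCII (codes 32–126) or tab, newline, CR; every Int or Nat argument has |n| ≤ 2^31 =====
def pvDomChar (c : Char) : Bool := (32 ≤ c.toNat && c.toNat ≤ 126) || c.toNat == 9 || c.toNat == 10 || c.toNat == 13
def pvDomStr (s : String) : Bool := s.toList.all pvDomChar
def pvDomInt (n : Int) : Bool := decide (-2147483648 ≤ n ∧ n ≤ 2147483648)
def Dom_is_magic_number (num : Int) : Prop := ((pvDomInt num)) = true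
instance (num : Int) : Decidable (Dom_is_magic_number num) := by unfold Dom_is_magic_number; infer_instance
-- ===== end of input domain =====

-- B scans the digits arithmetically (abs, %10, //10) instead of A's string conversion
-- with a manual index and a range-membership test; objective: more idiomatic, return value unchanged.

-- ===== PORT A =====
-- loop over the character list with the running index `ind`; the `range` test is ind < len
def aGo (len : Nat) : List Char → Nat → Bool
  | [], _ => false            -- loop falls through (unreachable for str(num): last iteration returns)
  | c :: rest, ind =>
      let ind' := ind + 1
      if c = '7' then true
      else if ind' < len then aGo len rest ind'
      else false

def is_magic_number (num : Int) : Bool :=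
  let numstr := PySem.Int.toStr num
  let numlist := numstr.toList
  aGo numlist.length numlist 0

-- ===== PORT B =====
def altGo (n : Nat) : Bool :=
  if h : n = 0 then false
  else if n % 10 = 7 then true
  else altGo (n / 10)
termination_by n
decreasing_by exact Nat.div_lt_self (Nat.pos_of_ne_zero h) (by norm_num)

def is_magic_number_alt (num : Int) : Bool := altGo num.natAbs

-- ===== PRECONDITION & SPEC =====
def Spec_is_magic_number (num : Int) (out : Bool) : Prop := out = is_magic_number_alt num
instance (num : Int) (out : Bool) : Decidable (Spec_is_magic_number num out) := by unfold Spec_is_magic_number; infer_instance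

-- ===== CLAIM (what is proved, stated in full; the proofs are below) =====
def Claim_equal_is_magic_number : Prop := ∀ (num : Int), Dom_is_magic_number num → Spec_is_magic_number num (is_magic_number num)

-- ===== LEMMAS AND PROOFS =====

theorem altGo_zero : altGo 0 = false := by unfold altGo; simp

theorem altGo_succ (n : Nat) (h : n ≠ 0) :
    altGo n = (decide (n % 10 = 7) || altGo (n / 10)) := by
  conv_lhs => unfold altGo
  simp only [h, dite_false]
  split_ifs with h7 <;> simp [h7]

theorem digitChar_eq_seven (r : Nat) (hr : r < 10) :
    (('7' = Nat.digitChar r) ↔ r = 7) := by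
  interval_cases r <;> decide

theorem aGo_contains (l : List Char) : ∀ ind : Nat,
    aGo (ind + l.length) l ind = l.contains '7' := by
  induction l with
  | nil => intro ind; simp [aGo]
  | cons c rest ih =>
    intro ind
    show aGo (ind + (rest.length + 1)) (c :: rest) ind = _
    unfold aGo
    by_cases hc : c = '7'
    · simp [hc]
    · simp only [hc, if_false]
      rcases rest with _ | ⟨d, rest'⟩
      · simp [Ne.symm hc]
      · have hlt : ind + 1 < ind + ((d :: rest').length + 1) := by
          simp only [List.length_cons]; omega
        simp only [hlt, if_true]
        have := ih (ind + 1)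
        have harr : ind + 1 + (d :: rest').length = ind + ((d :: rest').length + 1) := by omega
        rw [harr] at this
        rw [this]
        simp [Ne.symm hc]

theorem toDigitsCore_contains (f : Nat) : ∀ (n : Nat) (acc : List Char), n < f →
    ((Nat.toDigitsCore 10 f n acc).contains '7'
      = (decide (n % 10 = 7) || altGo (n / 10) || acc.contains '7')) := by
  induction f with
  | zero => intro n acc h; omega
  | succ f ih =>
    intro n acc h
    unfold Nat.toDigitsCore
    by_cases hz : n / 10 = 0
    · simp only [hz, if_true]
      rw [altGo_zero]
      simp [digitChar_eq_seven (n % 10) (Nat.mod_lt _ (by norm_num))]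
    · simp only [hz, if_false]
      have hlt : n / 10 < f := by
        have : n / 10 < n := Nat.div_lt_self (by omega) (by norm_num)
        omega
      rw [ih (n / 10) _ hlt]
      rw [altGo_succ (n / 10) hz]
      simp [digitChar_eq_seven (n % 10) (Nat.mod_lt _ (by norm_num)),
        Bool.or_assoc, Bool.or_comm, Bool.or_left_comm]

theorem toDigits_contains (n : Nat) :
    ((Nat.toDigits 10 n).contains '7' = altGo n) := by
  unfold Nat.toDigits
  rw [toDigitsCore_contains (n + 1) n [] (by omega)]
  by_cases hz : n = 0
  · subst hz; simp [altGo_zero]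
  · rw [altGo_succ n hz]
    simp

theorem contains_toChars (num : Int) :
    ((PySem.Int.toChars num).contains '7' = altGo num.natAbs) := by
  unfold PySem.Int.toChars
  by_cases hneg : num < 0
  · simp only [hneg, if_true]
    rw [← toDigits_contains]
    simp
  · simp only [hneg, if_false]
    have : num.toNat = num.natAbs := by omega
    rw [this, toDigits_contains]

theorem is_magic_number_eq_contains (num : Int) :
    is_magic_number num = ((PySem.Int.toChars num).contains '7') := by
  have h := aGo_contains (PySem.Int.toChars num) 0
  simp only [Nat.zero_add] at h
  unfold is_magic_number
  simp only [PySem.Int.toList_toStr]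
  exact h

-- ===== VERDICT (by name: the statement is the Claim_ definition above) =====
theorem is_magic_number_spec : Claim_equal_is_magic_number := by
  intro num _
  unfold Spec_is_magic_number is_magic_number_alt
  rw [is_magic_number_eq_contains, contains_toChars]
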